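-- pv_equiv track=rewrite | github.com/YurgenSlavniy/CHECIO | missions/Sort_Except_Zero.py | except_zero
-- ===== SOURCE A (Python) =====
-- from collections.abc import Iterable
-- from typing import Iterable
-- from typing import Iterable, List
-- from collections.abc import Iterable
--
-- def except_zero(items: list[int]) -> Iterable[int]:
--     zeros = [num for num in items if num == 0]
--     non_zeros = sorted([num for num in items if num != 0])
--
--     result = []
--     zero_index = 0
--     for num in items:
--         if num == 0:
--             result.append(0)
--             zero_index += 1
--         else:
--             result.append(non_zeros.pop(0))
--     return result
-- ===== SOURCE B (Python) =====
-- def except_zero(items: list) -> list: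
--     # index pass: where the non-zeros sit
--     positions = [i for i, n in enumerate(items) if n != 0]
--     # their values, sorted
--     values = sorted(items[i] for i in positions)
--     # scatter pass: copy keeps zeros in place, assign sorted values back
--     result = list(items)
--     for i, v in zip(positions, values):
--         result[i] = v
--     return result
-- ===== Notes on version B (the rewrite author's own statement) =====
-- stated objective: faster
-- what changed: A walks the list once branching per element and pops the sorted non-zeros from the front (each pop(0) is O(n), so O(n^2) total); B instead builds an index list of non-zero positions, sorts their values, copies the input and scatters the sorted values by index assignment - two flat passes, no queue consumption.
import Mathlib
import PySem

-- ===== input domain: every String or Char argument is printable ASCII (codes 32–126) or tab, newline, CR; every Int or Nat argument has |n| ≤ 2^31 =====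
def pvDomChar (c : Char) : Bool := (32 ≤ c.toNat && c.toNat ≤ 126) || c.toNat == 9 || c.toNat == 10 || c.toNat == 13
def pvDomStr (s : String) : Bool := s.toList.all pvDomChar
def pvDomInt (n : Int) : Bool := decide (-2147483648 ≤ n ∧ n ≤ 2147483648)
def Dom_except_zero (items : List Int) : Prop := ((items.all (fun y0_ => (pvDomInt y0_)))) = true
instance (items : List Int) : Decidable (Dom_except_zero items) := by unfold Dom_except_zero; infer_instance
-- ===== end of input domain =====

-- B replaces A's branching pop-from-the-front loop by an index pass plus a scatter pass (alternative decomposition, same result).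

-- ===== PORT A =====
-- the 'for num in items' loop consuming non_zeros.pop(0); the [] branch is unreachable
-- (Python would raise IndexError there, but non_zeros always holds exactly the remaining non-zeros)
def ezGoA : List Int → List Int → List Int
  | [], _ => []
  | num :: t, ns =>
      if num == 0 then 0 :: ezGoA t ns
      else match ns with
        | n :: rest => n :: ezGoA t rest
        | [] => []

def except_zero (items : List Int) : List Int :=
  let _zeros := items.filter (fun num => num == 0)   -- A computes 'zeros' (and zero_index) but never uses them
  let non_zeros := PySem.List.sorted (items.filter (fun num => num != 0)) (fun x => x)
  ezGoA items non_zeros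

-- ===== PORT B =====
-- indices produced by enumerate are ≥ 0 and in range, so .toNat / List.set / pyGetD are exact here
def except_zero_alt (items : List Int) : List Int :=
  let positions := ((PySem.List.enumerate items).filter (fun p => p.2 != 0)).map Prod.fst
  let values := PySem.List.sorted (positions.map (fun i => PySem.List.pyGetD items i 0)) (fun x => x)
  (positions.zip values).foldl (fun acc pv => acc.set pv.1.toNat pv.2) items

-- ===== PRECONDITION & SPEC =====
def Spec_except_zero (items : List Int) (out : List Int) : Prop := out = except_zero_alt items
instance (items : List Int) (out : List Int) : Decidable (Spec_except_zero items out) := by unfold Spec_except_zero; infer_instance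

-- ===== CLAIM (what is proved, stated in full; the proofs are below) =====
def Claim_equal_except_zero : Prop := ∀ (items : List Int), Dom_except_zero items → Spec_except_zero items (except_zero items)

-- ===== LEMMAS AND PROOFS =====

-- (index, value) pairs of the non-zero entries, structurally
def posVal : List Int → List (Int × Int)
  | [] => []
  | x :: t => (if x ≠ 0 then [((0 : Int), x)] else []) ++ (posVal t).map (fun p => (p.1 + 1, p.2))

theorem enum_shift (xs : List Int) (s : Int) :
    PySem.List.enumerate xs (s + 1) = (PySem.List.enumerate xs s).map (fun p => (p.1 + 1, p.2)) := by
  induction xs generalizing s with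
  | nil => simp [PySem.List.enumerate_nil]
  | cons x t ih => simp [PySem.List.enumerate_cons, ih (s + 1)]

theorem filt_eq (items : List Int) :
    (PySem.List.enumerate items 0).filter (fun p => p.2 != 0) = posVal items := by
  induction items with
  | nil => simp [PySem.List.enumerate_nil, posVal]
  | cons x t ih =>
    have He : PySem.List.enumerate t 1 = (PySem.List.enumerate t 0).map (fun p => (p.1 + 1, p.2)) := by
      simpa using enum_shift t 0
    by_cases hx : x = 0 <;>
      simp [PySem.List.enumerate_cons, He, List.filter_map, Function.comp_def, posVal, hx, ih]

theorem posVal_fst_nonneg (items : List Int) : ∀ p ∈ posVal items, 0 ≤ p.1 := by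
  induction items with
  | nil => simp [posVal]
  | cons x t ih =>
    intro p hp
    by_cases hx : x = 0 <;> simp [posVal, hx] at hp
    · obtain ⟨a, b, hq, rfl⟩ := hp
      have := ih (a, b) hq; simp; omega
    · rcases hp with rfl | ⟨a, b, hq, rfl⟩
      · simp
      · have := ih (a, b) hq; simp; omega

theorem getD_cons_succ (x : Int) (t : List Int) (i : Int) (h : 0 ≤ i) :
    PySem.List.pyGetD (x :: t) (i + 1) 0 = PySem.List.pyGetD t i 0 := by
  obtain ⟨n, rfl⟩ := Int.eq_ofNat_of_zero_le h
  have : ((n : Int) + 1) = ((n + 1 : Nat) : Int) := by push_cast; ring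
  rw [this, PySem.List.pyGetD_natCast, PySem.List.pyGetD_natCast]
  simp [List.getD]

theorem posVal_getD (items : List Int) : ∀ p ∈ posVal items, PySem.List.pyGetD items p.1 0 = p.2 := by
  induction items with
  | nil => simp [posVal]
  | cons x t ih =>
    intro p hp
    by_cases hx : x = 0 <;> simp [posVal, hx] at hp
    · obtain ⟨a, b, hq, rfl⟩ := hp
      simpa [getD_cons_succ x t a (posVal_fst_nonneg t (a, b) hq)] using ih (a, b) hq
    · rcases hp with rfl | ⟨a, b, hq, rfl⟩
      · simp [PySem.List.pyGetD]
      · simpa [getD_cons_succ x t a (posVal_fst_nonneg t (a, b) hq)] using ih (a, b) hq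

theorem posVal_snd (items : List Int) :
    (posVal items).map Prod.snd = items.filter (fun num => num != 0) := by
  induction items with
  | nil => simp [posVal]
  | cons x t ih =>
    by_cases hx : x = 0 <;> simp [posVal, hx, List.map_map, Function.comp_def, ih]

theorem scatter_shift (l : List (Int × Int)) (a : Int) (base : List Int)
    (h : ∀ pv ∈ l, 0 ≤ pv.1) :
    (l.map (fun pv => (pv.1 + 1, pv.2))).foldl (fun acc pv => acc.set pv.1.toNat pv.2) (a :: base)
      = a :: l.foldl (fun acc pv => acc.set pv.1.toNat pv.2) base := by
  induction l generalizing base with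
  | nil => simp
  | cons pv rest ih =>
    have h0 : 0 ≤ pv.1 := h pv (by simp)
    have ht : (pv.1 + 1).toNat = pv.1.toNat + 1 := by omega
    simp only [List.map_cons, List.foldl_cons, ht, List.set]
    exact ih (base.set pv.1.toNat pv.2) (fun q hq => h q (List.mem_cons_of_mem _ hq))

theorem main_scatter (items : List Int) : ∀ (ns : List Int), ns.length = (posVal items).length →
    (((posVal items).map Prod.fst).zip ns).foldl (fun acc pv => acc.set pv.1.toNat pv.2) items
      = ezGoA items ns := by
  induction items with
  | nil => intro ns _; simp [posVal, ezGoA]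
  | cons x t ih =>
    intro ns hlen
    by_cases hx : x = 0
    · subst hx
      have hpv : posVal ((0 : Int) :: t) = (posVal t).map (fun p => (p.1 + 1, p.2)) := by
        simp [posVal]
      rw [hpv] at hlen ⊢
      rw [show ((posVal t).map fun p : Int × Int => ((p.1 + 1 : Int), p.2)).map Prod.fst
            = ((posVal t).map Prod.fst).map (fun i => i + 1) by
          simp [List.map_map, Function.comp_def],
          List.zip_map_left,
          show ((((posVal t).map Prod.fst).zip ns).map (Prod.map (fun i : Int => i + 1) id))
            = (((posVal t).map Prod.fst).zip ns).map (fun pv => (pv.1 + 1, pv.2)) from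
            List.map_congr_left (fun pv _ => rfl),
          scatter_shift _ _ _ ?_, ih ns (by simpa using hlen)]
      · simp [ezGoA]
      · intro pv hpv2
        obtain ⟨hp1, _⟩ := List.of_mem_zip hpv2
        obtain ⟨q, hq, hq2⟩ := List.mem_map.mp hp1
        exact hq2 ▸ posVal_fst_nonneg t q hq
    · have hxb : (x == 0) = false := by simp [hx]
      simp only [posVal, if_pos hx, List.singleton_append, List.map_cons, List.length_cons] at hlen ⊢
      cases ns with
      | nil => simp at hlen
      | cons n rest =>
        simp only [List.zip_cons_cons, List.foldl_cons]
        have hset : (x :: t).set ((0 : Int)).toNat n = n :: t := by simp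
        rw [hset]
        have hzip : (((posVal t).map (fun p : Int × Int => (p.1 + 1, p.2))).map Prod.fst).zip rest
            = (((posVal t).map Prod.fst).zip rest).map (fun pv => (pv.1 + 1, pv.2)) := by
          rw [show ((posVal t).map fun p : Int × Int => ((p.1 + 1 : Int), p.2)).map Prod.fst
                = ((posVal t).map Prod.fst).map (fun i => i + 1) by simp [List.map_map, Function.comp_def],
              List.zip_map_left]
          rfl
        rw [hzip, scatter_shift _ _ _ ?_, ih rest (by simpa using hlen)]
        · simp [ezGoA, hxb]
        · intro pv hpv
          obtain ⟨hp1, _⟩ := List.of_mem_zip hpv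
          obtain ⟨q, hq, hq2⟩ := List.mem_map.mp hp1
          exact hq2 ▸ posVal_fst_nonneg t q hq

theorem values_eq (items : List Int) :
    ((((PySem.List.enumerate items).filter (fun p => p.2 != 0)).map Prod.fst).map
        (fun i => PySem.List.pyGetD items i 0))
      = items.filter (fun num => num != 0) := by
  rw [show PySem.List.enumerate items = PySem.List.enumerate items 0 from rfl, filt_eq,
      List.map_map]
  rw [← posVal_snd]
  exact List.map_congr_left (fun p hp => posVal_getD items p hp)

-- ===== VERDICT (by name: the statement is the Claim_ definition above) =====
theorem except_zero_spec : Claim_equal_except_zero := by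
  intro items _
  unfold Spec_except_zero
  show ezGoA items (PySem.List.sorted (items.filter (fun num => num != 0)) (fun x => x))
      = ((((PySem.List.enumerate items).filter (fun p => p.2 != 0)).map Prod.fst).zip
          (PySem.List.sorted
            ((((PySem.List.enumerate items).filter (fun p => p.2 != 0)).map Prod.fst).map
              (fun i => PySem.List.pyGetD items i 0)) (fun x => x))).foldl
          (fun acc pv => acc.set pv.1.toNat pv.2) items
  rw [values_eq items,
      show PySem.List.enumerate items = PySem.List.enumerate items 0 from rfl, filt_eq]
  have hlen : (PySem.List.sorted (items.filter (fun num => num != 0)) (fun x => x)).length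
      = (posVal items).length := by
    rw [PySem.List.length_sorted, ← posVal_snd, List.length_map]
  exact (main_scatter items _ hlen).symm
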